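-- pv_equiv track=rewrite | github.com/barryptak/AdventOfCode | 2015/13.py | score_order
-- ===== SOURCE A (Python) =====
-- def score_order(order, happiness):
--     """
--     Calculate the overall happiness score for the supplied seating order
--     """
--     score = 0
--
--     # Iterate through all people in the order from first to second last
--     # (as we need to special-case the index lookups for the last person)
--     for i, person in enumerate(order[:-1]):
--         score += happiness[person][order[i-1]]
--         score += happiness[person][order[i+1]]
--
--     # Don't forget to account for the last person in the order who needs to
--     # consider the first person too.
--     score += happiness[order[-1]][order[0]]
--     score += happiness[order[-1]][order[-2]]
--
--     return score
-- ===== SOURCE B (Python) =====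
-- def score_order(order, happiness):
--     """
--     Calculate the overall happiness score for the supplied seating order
--     """
--     def pair(a, b):
--         return happiness[a][b] + happiness[b][a]
--
--     first = order[0]
--
--     def go(rest):
--         if len(rest) == 1:
--             return pair(rest[0], first)
--         return pair(rest[0], rest[1]) + go(rest[1:])
--
--     return go(order)
-- ===== Notes on version B (the rewrite author's own statement) =====
-- stated objective: alternative
-- what changed: B is a recursive decomposition over the list structure: a pair helper scores one undirected edge in both directions, and a recursion consumes the list pairwise with no indices, negative indexing or modulo arithmetic, closing the cycle against the saved first element at the base case; A is an index loop with order[i-1]/order[i+1] tricks and a special-cased last person.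
import Mathlib
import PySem

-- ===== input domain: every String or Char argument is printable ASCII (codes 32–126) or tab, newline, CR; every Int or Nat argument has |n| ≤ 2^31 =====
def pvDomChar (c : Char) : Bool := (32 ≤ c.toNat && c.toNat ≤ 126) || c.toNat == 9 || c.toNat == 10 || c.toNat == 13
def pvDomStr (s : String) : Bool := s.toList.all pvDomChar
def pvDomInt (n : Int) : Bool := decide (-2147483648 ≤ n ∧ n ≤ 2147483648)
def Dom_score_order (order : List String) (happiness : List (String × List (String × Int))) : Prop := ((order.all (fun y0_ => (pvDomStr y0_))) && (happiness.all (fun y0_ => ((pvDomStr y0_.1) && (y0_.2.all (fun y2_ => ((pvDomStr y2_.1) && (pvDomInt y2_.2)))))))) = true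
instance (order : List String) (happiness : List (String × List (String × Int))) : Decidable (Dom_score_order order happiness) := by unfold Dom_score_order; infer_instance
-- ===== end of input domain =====

-- B replaces A's index loop (order[i-1]/order[i+1] tricks plus a special-cased last person) by a
-- recursion over the list structure with a per-edge pair helper and no index arithmetic at all.

-- happiness[a][b]: the nested dict lookup both Pythons perform (the getD 0 default is only
-- reachable outside Pre_, where Python raises KeyError)
def hget (happiness : List (String × List (String × Int))) (a b : String) : Int :=
  (((PySem.Dict.mk happiness).get? a).bind (fun inner => (PySem.Dict.mk inner).get? b)).getD 0

-- ===== PORT A =====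
def score_order (order : List String) (happiness : List (String × List (String × Int))) : Int :=
  let score : Int :=
    (PySem.List.enumerate (PySem.List.slice order none (some (-1)))).foldl
      (fun score ip =>
        score + hget happiness ip.2 ((PySem.List.pyGet? order (ip.1 - 1)).getD "")
              + hget happiness ip.2 ((PySem.List.pyGet? order (ip.1 + 1)).getD "")) 0
  score + hget happiness ((PySem.List.pyGet? order (-1)).getD "") ((PySem.List.pyGet? order 0).getD "")
        + hget happiness ((PySem.List.pyGet? order (-1)).getD "") ((PySem.List.pyGet? order (-2)).getD "")

-- ===== PORT B =====
-- pair(a, b): both directed scores of one undirected edge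
def pairScore (happiness : List (String × List (String × Int))) (a b : String) : Int :=
  hget happiness a b + hget happiness b a

-- go(rest): recursion over the list tail, closing the cycle with `first` at the base case
def goB (happiness : List (String × List (String × Int))) (first : String) : List String → Int
  | [] => 0                                   -- unreachable: Python's rest[0] would raise here
  | [x] => pairScore happiness x first
  | x :: y :: rest => pairScore happiness x y + goB happiness first (y :: rest)

def score_order_alt (order : List String) (happiness : List (String × List (String × Int))) : Int :=
  match order with
  | [] => 0                                   -- Python raises IndexError on order[0] (outside Pre_)
  | first :: _ => goB happiness first order

-- ===== PRECONDITION & SPEC =====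
-- does happiness[a][b] exist? (used only by Pre_)
def hhas (happiness : List (String × List (String × Int))) (a b : String) : Bool :=
  (((PySem.Dict.mk happiness).get? a).bind (fun inner => (PySem.Dict.mk inner).get? b)).isSome

-- Pre_ excludes exactly the inputs where Python A raises: orders of length < 2 (IndexError on
-- order[-1] / order[-2]) and inputs missing a happiness entry for some circularly adjacent
-- pair of the order, in either direction (KeyError).
def Pre_score_order (order : List String) (happiness : List (String × List (String × Int))) : Prop :=
  2 ≤ order.length ∧
  ∀ i ∈ List.range order.length,
    hhas happiness (order.getD i "") (order.getD ((i + 1) % order.length) "") = true ∧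
    hhas happiness (order.getD ((i + 1) % order.length) "") (order.getD i "") = true

instance (order : List String) (happiness : List (String × List (String × Int))) : Decidable (Pre_score_order order happiness) := by unfold Pre_score_order; infer_instance

def pvWitness_score_order : List String × (List (String × List (String × Int))) :=
  (["a", "b"], [("a", [("b", 1)]), ("b", [("a", 2)])])

def Spec_score_order (order : List String) (happiness : List (String × List (String × Int))) (out : Int) : Prop := out = score_order_alt order happiness
instance (order : List String) (happiness : List (String × List (String × Int))) (out : Int) : Decidable (Spec_score_order order happiness out) := by unfold Spec_score_order; infer_instance

-- ===== CLAIM (what is proved, stated in full; the proofs are below) =====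
def Claim_equal_score_order : Prop := ∀ (order : List String) (happiness : List (String × List (String × Int))), Dom_score_order order happiness → Pre_score_order order happiness → Spec_score_order order happiness (score_order order happiness)

-- ===== LEMMAS AND PROOFS =====

-- order[k] as a total function, for stating the index sums
def gidx (order : List String) (k : Nat) : String := order.getD k ""

lemma enumerate_eq_map_range {α : Type} (xs : List α) (d : α) (s : Int) :
    PySem.List.enumerate xs s =
      (List.range xs.length).map (fun (k : Nat) => (s + (k : Int), xs.getD k d)) := by
  induction xs generalizing s with
  | nil => simp [PySem.List.enumerate_nil]
  | cons x xs ih =>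
      simp only [PySem.List.enumerate_cons, List.length_cons, List.range_succ_eq_map,
        List.map_cons, List.map_map]
      refine congrArg₂ _ (by simp) ?_
      rw [ih (s + 1)]
      apply List.map_congr_left
      intro k _
      simp only [Function.comp]
      refine Prod.ext ?_ rfl
      push_cast
      ring

lemma sum_map_range_eq (f : Nat → Int) (m : Nat) :
    ((List.range m).map f).sum = ∑ k ∈ Finset.range m, f k := by
  induction m with
  | zero => simp
  | succ m ih => rw [List.range_succ, Finset.sum_range_succ, List.map_append]; simp [ih]

lemma mod_prev_pos (n k : Nat) (h1 : 1 ≤ k) (h2 : k < n) : (k + n - 1) % n = k - 1 := by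
  have h : k + n - 1 = (k - 1) + n := by omega
  rw [h, Nat.add_mod_right, Nat.mod_eq_of_lt (by omega)]

lemma mod_prev_zero (n : Nat) (h : 0 < n) : (0 + n - 1) % n = n - 1 := by
  rw [Nat.mod_eq_of_lt (by omega)]
  omega

lemma mod_shift1 (n k : Nat) (h : 0 < n) (hk : k < n) : ((k + n - 1) % n + 1) % n = k := by
  rcases Nat.eq_zero_or_pos k with rfl | hk0
  · rw [mod_prev_zero n h]
    have : n - 1 + 1 = n := by omega
    rw [this, Nat.mod_self]
  · rw [mod_prev_pos n k hk0 hk]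
    have : k - 1 + 1 = k := by omega
    rw [this, Nat.mod_eq_of_lt hk]

lemma mod_shift2 (n k : Nat) (h : 0 < n) (hk : k < n) : ((k + 1) % n + n - 1) % n = k := by
  rcases Nat.lt_or_ge (k + 1) n with h1 | h1
  · rw [Nat.mod_eq_of_lt h1, mod_prev_pos n (k + 1) (by omega) h1]
    omega
  · have hkn : k + 1 = n := by omega
    rw [hkn, Nat.mod_self, mod_prev_zero n h]
    omega

lemma sum_range_pred (f : Nat → Int) (n : Nat) (h : 1 ≤ n) :
    ∑ k ∈ Finset.range n, f k = ∑ k ∈ Finset.range (n - 1), f k + f (n - 1) := by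
  cases n with
  | zero => omega
  | succ m => simp [Finset.sum_range_succ]

-- A as a sum over the seat indices: each person adds the scores towards both neighbours
lemma scoreA_sum (order : List String) (H : List (String × List (String × Int)))
    (h2 : 2 ≤ order.length) :
    score_order order H =
      ∑ k ∈ Finset.range order.length,
        (hget H (gidx order k) (gidx order ((k + order.length - 1) % order.length)) +
         hget H (gidx order k) (gidx order ((k + 1) % order.length))) := by
  have hn : 0 < order.length := by omega
  simp only [score_order, PySem.List.slice_to_neg_one,
    enumerate_eq_map_range order.dropLast "" 0, List.foldl_map]
  have hfun : (fun (score : Int) (k : Nat) =>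
      score + hget H (order.dropLast.getD k "") ((PySem.List.pyGet? order ((0 + (k:Int)) - 1)).getD "")
            + hget H (order.dropLast.getD k "") ((PySem.List.pyGet? order ((0 + (k:Int)) + 1)).getD "")) =
      (fun (score : Int) (k : Nat) =>
      score + (hget H (order.dropLast.getD k "") ((PySem.List.pyGet? order ((0 + (k:Int)) - 1)).getD "")
            + hget H (order.dropLast.getD k "") ((PySem.List.pyGet? order ((0 + (k:Int)) + 1)).getD ""))) := by
    funext s k; ring
  rw [hfun, PySem.List.foldl_add, sum_map_range_eq, List.length_dropLast]
  have hlast : (PySem.List.pyGet? order (-1)).getD "" = gidx order (order.length - 1) := by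
    rw [PySem.List.pyGet?_neg_one, List.getLast?_eq_getElem?]
    simp [gidx, List.getD]
  have hfirst : (PySem.List.pyGet? order 0).getD "" = gidx order ((order.length - 1 + 1) % order.length) := by
    have : (order.length - 1 + 1) % order.length = 0 := by
      rw [show order.length - 1 + 1 = order.length by omega, Nat.mod_self]
    rw [this, PySem.List.pyGet?_zero]
    simp [gidx, List.getD]
  have hsecond : (PySem.List.pyGet? order (-2)).getD "" =
      gidx order ((order.length - 1 + order.length - 1) % order.length) := by
    rw [PySem.List.pyGet?_neg_ofNat order 2 (by omega) h2]
    have : (order.length - 1 + order.length - 1) % order.length = order.length - 2 := by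
      have h : order.length - 1 + order.length - 1 = (order.length - 2) + order.length := by omega
      rw [h, Nat.add_mod_right, Nat.mod_eq_of_lt (by omega)]
    rw [this]
    simp [gidx, List.getD]
  rw [hlast, hfirst, hsecond]
  conv_rhs => rw [sum_range_pred _ _ (by omega : 1 ≤ order.length)]
  have hcong : ∀ k ∈ Finset.range (order.length - 1),
      (hget H (order.dropLast.getD k "") ((PySem.List.pyGet? order ((0 + (k:Int)) - 1)).getD "")
        + hget H (order.dropLast.getD k "") ((PySem.List.pyGet? order ((0 + (k:Int)) + 1)).getD "")) =
      (hget H (gidx order k) (gidx order ((k + order.length - 1) % order.length)) +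
       hget H (gidx order k) (gidx order ((k + 1) % order.length))) := by
    intro k hk
    rw [Finset.mem_range] at hk
    have hkl : k < order.length := by omega
    have hdl : order.dropLast.getD k "" = gidx order k := by
      simp [gidx, List.getD, hk, List.getElem?_eq_getElem hkl]
    have hnext : (PySem.List.pyGet? order ((0 + (k:Int)) + 1)).getD "" =
        gidx order ((k + 1) % order.length) := by
      have hc : (0 + (k:Int)) + 1 = ((k + 1 : Nat) : Int) := by push_cast; ring
      rw [hc, PySem.List.pyGet?_natCast, Nat.mod_eq_of_lt (by omega)]
      simp [gidx, List.getD]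
    have hprev : (PySem.List.pyGet? order ((0 + (k:Int)) - 1)).getD "" =
        gidx order ((k + order.length - 1) % order.length) := by
      rcases Nat.eq_zero_or_pos k with rfl | hk0
      · have hc : (0 + ((0:Nat):Int)) - 1 = (-1 : Int) := by norm_num
        rw [hc, PySem.List.pyGet?_neg_one, List.getLast?_eq_getElem?, mod_prev_zero _ hn]
        simp [gidx, List.getD]
      · have hc : (0 + (k:Int)) - 1 = ((k - 1 : Nat) : Int) := by omega
        rw [hc, PySem.List.pyGet?_natCast, mod_prev_pos _ _ hk0 (by omega)]
        simp [gidx, List.getD]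
    rw [hdl, hnext, hprev]
  rw [Finset.sum_congr rfl hcong]
  ring

-- B's recursion computes the chain of consecutive edges plus the closing edge to `first`
lemma goB_sum (H : List (String × List (String × Int))) (f : String) :
    ∀ xs : List String, xs ≠ [] →
      goB H f xs =
        (∑ k ∈ Finset.range (xs.length - 1), pairScore H (gidx xs k) (gidx xs (k + 1))) +
          pairScore H (gidx xs (xs.length - 1)) f := by
  intro xs
  induction xs with
  | nil => intro h; exact absurd rfl h
  | cons x xs ih =>
      intro _
      cases xs with
      | nil => simp [goB, gidx]
      | cons y rest =>
          have hne : (y :: rest) ≠ [] := by simp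
          rw [show goB H f (x :: y :: rest) = pairScore H x y + goB H f (y :: rest) from rfl,
            ih hne]
          simp only [List.length_cons, Nat.add_sub_cancel]
          rw [Finset.sum_range_succ']
          have hshift : ∀ k : Nat, gidx (x :: y :: rest) (k + 1) = gidx (y :: rest) k := by
            intro k; simp [gidx]
          have h0 : gidx (x :: y :: rest) 0 = x := rfl
          have hy : gidx (y :: rest) 0 = y := rfl
          simp only [hshift, h0, hy]
          ring

-- B as the sum over the n circular edges
lemma scoreB_sum (order : List String) (H : List (String × List (String × Int)))
    (h2 : 2 ≤ order.length) :
    score_order_alt order H =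
      ∑ k ∈ Finset.range order.length,
        pairScore H (gidx order k) (gidx order ((k + 1) % order.length)) := by
  obtain ⟨f, t, rfl⟩ : ∃ f t, order = f :: t := by
    cases order with
    | nil => simp at h2
    | cons f t => exact ⟨f, t, rfl⟩
  set xs := f :: t with hxs
  have hne : xs ≠ [] := by simp [hxs]
  have hB : score_order_alt xs H = goB H f xs := rfl
  rw [hB, goB_sum H f xs hne]
  conv_rhs => rw [sum_range_pred _ _ (by omega : 1 ≤ xs.length)]
  have hlastmod : (xs.length - 1 + 1) % xs.length = 0 := by
    rw [show xs.length - 1 + 1 = xs.length by omega, Nat.mod_self]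
  have h0 : gidx xs 0 = f := rfl
  rw [hlastmod, h0]
  refine congrArg₂ _ ?_ rfl
  apply Finset.sum_congr rfl
  intro k hk
  rw [Finset.mem_range] at hk
  rw [Nat.mod_eq_of_lt (by omega)]

-- A's backward-neighbour sum is a reindexing of the reverse-direction edge sum
lemma sum_swap_dir (order : List String) (H : List (String × List (String × Int)))
    (h2 : 2 ≤ order.length) :
    ∑ k ∈ Finset.range order.length,
        hget H (gidx order k) (gidx order ((k + order.length - 1) % order.length)) =
    ∑ k ∈ Finset.range order.length,
        hget H (gidx order ((k + 1) % order.length)) (gidx order k) := by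
  have hn : 0 < order.length := by omega
  refine Finset.sum_nbij' (fun k => (k + order.length - 1) % order.length)
    (fun k => (k + 1) % order.length) ?_ ?_ ?_ ?_ ?_
  · intro a ha; exact Finset.mem_range.mpr (Nat.mod_lt _ hn)
  · intro a ha; exact Finset.mem_range.mpr (Nat.mod_lt _ hn)
  · intro a ha; exact mod_shift1 _ _ hn (Finset.mem_range.mp ha)
  · intro a ha; exact mod_shift2 _ _ hn (Finset.mem_range.mp ha)
  · intro a ha
    rw [mod_shift1 _ _ hn (Finset.mem_range.mp ha)]

lemma scoreAB (order : List String) (H : List (String × List (String × Int)))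
    (h2 : 2 ≤ order.length) :
    score_order order H = score_order_alt order H := by
  rw [scoreA_sum order H h2, scoreB_sum order H h2]
  simp only [pairScore]
  rw [Finset.sum_add_distrib, Finset.sum_add_distrib, sum_swap_dir order H h2]
  ring

-- ===== VERDICT (by name: the statement is the Claim_ definition above) =====
theorem score_order_spec : Claim_equal_score_order := by
  intro order happiness _ hpre
  unfold Spec_score_order
  exact scoreAB order happiness hpre.1
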